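-- pv_equiv track=rewrite | github.com/lmy375/Practices | pwn/format_str/fmt_argv.py | gen_fmt_payload
-- ===== SOURCE A (Python) =====
-- def gen_fmt_payload(write_map):
-- 	printed = 0
-- 	payload = ''
-- 	for value in sorted(write_map):
-- 		tmp = value-printed
-- 		if tmp > 0:
-- 			payload += '%'+ str(tmp) + 'c%'
-- 		payload += str(write_map[value]) +'$hn'
-- 		printed = value
-- 	return payload
-- ===== SOURCE B (Python) =====
-- def gen_fmt_payload(write_map):
--     items = sorted(write_map.items())
--
--     def render(lo, hi, prev):
--         # payload fragment for items[lo:hi], given the sorted predecessor key 'prev'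
--         if hi - lo == 0:
--             return ''
--         if hi - lo == 1:
--             key, val = items[lo]
--             gap = key - prev
--             return (('%' + str(gap) + 'c%') if gap > 0 else '') + str(val) + '$hn'
--         mid = (lo + hi) // 2
--         return render(lo, mid, prev) + render(mid, hi, items[mid - 1][0])
--
--     return render(0, len(items), 0)
-- ===== Notes on version B (the rewrite author's own statement) =====
-- stated objective: alternative
-- what changed: Replaces A's left-to-right accumulator loop (running 'printed' state, per-key dict lookups, repeated +=) by a divide-and-conquer renderer over the sorted (key, value) item pairs: each half is rendered independently with its predecessor key passed explicitly, and the two halves are concatenated.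
import Mathlib
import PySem

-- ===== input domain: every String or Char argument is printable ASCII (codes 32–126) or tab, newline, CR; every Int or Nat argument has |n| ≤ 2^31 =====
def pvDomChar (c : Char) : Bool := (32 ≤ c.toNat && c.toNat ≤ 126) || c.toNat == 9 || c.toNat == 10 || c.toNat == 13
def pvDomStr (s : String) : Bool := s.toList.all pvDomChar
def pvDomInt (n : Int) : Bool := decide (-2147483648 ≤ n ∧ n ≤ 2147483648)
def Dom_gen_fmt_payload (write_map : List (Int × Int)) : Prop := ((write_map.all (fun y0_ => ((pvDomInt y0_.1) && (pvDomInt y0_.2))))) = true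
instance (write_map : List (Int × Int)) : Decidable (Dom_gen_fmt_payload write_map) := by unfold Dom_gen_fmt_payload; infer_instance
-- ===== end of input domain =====

-- B replaces A's left-to-right accumulator loop (running 'printed' state, per-key
-- dict lookups, repeated +=) by a divide-and-conquer renderer over the sorted
-- (key, value) item pairs, each half rendered with its predecessor key passed
-- explicitly; same output, alternative algorithm of similar cost.

-- ===== PORT A =====
-- loop body of A: state = (printed, payload)
def pvStepA (write_map : List (Int × Int)) (st : Int × String) (value : Int) : Int × String :=
  let tmp := value - st.1
  let payload := if tmp > 0 then st.2 ++ "%" ++ PySem.Int.toStr tmp ++ "c%" else st.2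
  let payload := payload ++ PySem.Int.toStr ((write_map.lookup value).getD 0) ++ "$hn"
  (value, payload)

def gen_fmt_payload (write_map : List (Int × Int)) : String :=
  ((PySem.List.sorted (write_map.map Prod.fst) (fun x => x) false).foldl
    (pvStepA write_map) (0, "")).2

-- ===== PORT B =====
-- fragment for one (key, value) pair given the predecessor key
def pvFrag (prev : Int) (kv : Int × Int) : String :=
  (if kv.1 - prev > 0 then "%" ++ PySem.Int.toStr (kv.1 - prev) ++ "c%" else "")
    ++ PySem.Int.toStr kv.2 ++ "$hn"

-- B's render(lo, hi, prev), carried as the sublist items[lo:hi] (the indices lo/hi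
-- of Source B only ever address this slice; items[mid-1] is the slice's last left element)
def pvRender (items : List (Int × Int)) (prev : Int) : String :=
  if items.length ≤ 1 then
    match items with
    | [] => ""
    | kv :: _ => pvFrag prev kv
  else
    let mid := items.length / 2
    pvRender (items.take mid) prev
      ++ pvRender (items.drop mid) (items.getD (mid - 1) (0, 0)).1
termination_by items.length
decreasing_by
  · simp only [List.length_take]; omega
  · simp only [List.length_drop]; omega

def gen_fmt_payload_alt (write_map : List (Int × Int)) : String :=
  pvRender (PySem.List.sorted write_map (fun kv => kv.1) false) 0

-- ===== PRECONDITION & SPEC =====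
-- Pre_ excludes association lists with duplicate keys: they are not distinct Python
-- dicts at all (the dict collapses them, last value winning) while the assoc-list
-- convention looks up the first match — a corner of the encoding, not of A.
def Pre_gen_fmt_payload (write_map : List (Int × Int)) : Prop :=
  (write_map.map Prod.fst).Nodup
instance (write_map : List (Int × Int)) : Decidable (Pre_gen_fmt_payload write_map) := by
  unfold Pre_gen_fmt_payload; infer_instance

def pvWitness_gen_fmt_payload : (List (Int × Int)) := [(4, 100), (8, 50), (2, -3)]

def Spec_gen_fmt_payload (write_map : List (Int × Int)) (out : String) : Prop := out = gen_fmt_payload_alt write_map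
instance (write_map : List (Int × Int)) (out : String) : Decidable (Spec_gen_fmt_payload write_map out) := by unfold Spec_gen_fmt_payload; infer_instance

-- ===== CLAIM (what is proved, stated in full; the proofs are below) =====
def Claim_equal_gen_fmt_payload : Prop := ∀ (write_map : List (Int × Int)), Dom_gen_fmt_payload write_map → Pre_gen_fmt_payload write_map → Spec_gen_fmt_payload write_map (gen_fmt_payload write_map)

-- ===== LEMMAS AND PROOFS =====

-- proof-side linear characterisation of the payload for a list of pairs
def pvLin : Int → List (Int × Int) → String
  | _, [] => ""
  | prev, kv :: rest => pvFrag prev kv ++ pvLin kv.1 rest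

-- with nodup keys, lookup of a member pair's key yields its value
lemma lookup_of_mem_nodup (wm : List (Int × Int)) (h : (wm.map Prod.fst).Nodup) :
    ∀ q ∈ wm, wm.lookup q.1 = some q.2 := by
  induction wm with
  | nil => intro q hq; cases hq
  | cons a rest ih =>
      intro q hq
      simp only [List.map_cons, List.nodup_cons] at h
      rcases List.mem_cons.mp hq with hq | hq
      · subst hq; simp [List.lookup]
      · have hne : q.1 ≠ a.1 := by
          intro he
          exact h.1 (he ▸ List.mem_map_of_mem hq)
        have : (q.1 == a.1) = false := beq_eq_false_iff_ne.mpr hne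
        simp [List.lookup, this, ih h.2 q hq]

-- A's fold over the keys of 'pairs' equals the linear characterisation
lemma foldA_eq_lin (wm : List (Int × Int)) :
    ∀ (pairs : List (Int × Int)), (∀ q ∈ pairs, wm.lookup q.1 = some q.2) →
    ∀ (p : Int) (s : String),
      ((pairs.map Prod.fst).foldl (pvStepA wm) (p, s)).2 = s ++ pvLin p pairs := by
  intro pairs
  induction pairs with
  | nil => intro _ p s; simp [pvLin]
  | cons q rest ih =>
      intro hlk p s
      obtain ⟨k, v⟩ := q
      have hv : wm.lookup k = some v := hlk (k, v) (List.mem_cons_self)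
      have hstep : pvStepA wm (p, s) k = (k, s ++ pvFrag p (k, v)) := by
        unfold pvStepA pvFrag
        simp only [hv]
        split_ifs <;> simp [String.append_assoc]
      simp only [List.map_cons, List.foldl_cons, hstep, pvLin]
      rw [ih (fun q hq => hlk q (List.mem_cons_of_mem _ hq)) k _]
      simp [String.append_assoc]

-- splitting the linear characterisation at an append
lemma lin_append (l r : List (Int × Int)) : ∀ prev,
    pvLin prev (l ++ r)
      = pvLin prev l ++ pvLin (match l.getLast? with | some q => q.1 | none => prev) r := by
  induction l with
  | nil => intro prev; simp [pvLin]
  | cons q l ih =>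
      intro prev
      simp only [List.cons_append, pvLin, ih q.1, String.append_assoc]
      cases l with
      | nil => simp
      | cons a t =>
          rw [List.getLast?_cons_cons]
          cases h : (a :: t).getLast? with
          | none => exact absurd h (by simp)
          | some b => rfl

-- the divide-and-conquer renderer computes the linear characterisation
lemma render_eq_lin : ∀ (n : Nat) (items : List (Int × Int)), items.length ≤ n →
    ∀ prev, pvRender items prev = pvLin prev items := by
  intro n
  induction n with
  | zero =>
      intro items h prev
      have : items = [] := List.length_eq_zero_iff.mp (Nat.le_zero.mp h)
      subst this
      rw [pvRender]; simp [pvLin]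
  | succ n ih =>
      intro items h prev
      rw [pvRender.eq_def]
      by_cases h1 : items.length ≤ 1
      · simp only [h1, if_true]
        match items, h1 with
        | [], _ => simp [pvLin]
        | [kv], _ => simp [pvLin]
      · simp only [h1, if_false]
        have hlen : 2 ≤ items.length := by omega
        have hmid1 : 1 ≤ items.length / 2 := by omega
        have hmidlt : items.length / 2 < items.length := by omega
        have hsplit := List.take_append_drop (items.length / 2) items
        have hlast : (items.take (items.length / 2)).getLast?
            = items[items.length / 2 - 1]? := by
          rw [List.getLast?_eq_getElem?]
          rw [List.length_take]
          have : min (items.length / 2) items.length = items.length / 2 := by omega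
          rw [this, List.getElem?_take_of_lt (by omega)]
        have hgd : items[items.length / 2 - 1]?
            = some (items.getD (items.length / 2 - 1) (0, 0)) := by
          have hlt : items.length / 2 - 1 < items.length := by omega
          simp [List.getD_eq_getElem?_getD, List.getElem?_eq_getElem hlt]
        rw [ih _ (by simp [List.length_take]; omega),
            ih _ (by simp [List.length_drop]; omega)]
        conv_rhs => rw [← hsplit]
        rw [lin_append]
        rw [hlast, hgd]

-- ===== VERDICT (by name: the statement is the Claim_ definition above) =====
theorem gen_fmt_payload_spec : Claim_equal_gen_fmt_payload := by
  intro wm _ hpre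
  show gen_fmt_payload wm = gen_fmt_payload_alt wm
  unfold gen_fmt_payload gen_fmt_payload_alt
  have hkeys : PySem.List.sorted (wm.map Prod.fst) (fun x => x) false
      = (PySem.List.sorted wm (fun kv => kv.1) false).map Prod.fst := by
    apply PySem.List.sorted_id_eq_of_perm_of_pairwise
    · exact (PySem.List.sorted_perm wm (fun kv => kv.1) false).map Prod.fst
    · exact PySem.List.sorted_map_key_pairwise wm (fun kv => kv.1)
  rw [hkeys]
  rw [foldA_eq_lin wm _ (fun q hq => lookup_of_mem_nodup wm hpre q
      ((PySem.List.mem_sorted wm (fun kv => kv.1) false q).mp hq))]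
  rw [render_eq_lin (PySem.List.sorted wm (fun kv => kv.1) false).length _ le_rfl]
  simp
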